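-- pv_equiv track=rewrite | github.com/innowantai/AutoBooking | AutoTrainBookingVersion_2_CNN_notComplete/A_0_1_SplitFigureOBJ.py | diffAndCatching
-- ===== SOURCE A (Python) =====
-- def diffAndCatching(data):
--     dif = []
--     for ii in range(1,len(data),2):
--         dif.append(data[ii]-data[ii-1])
--     po = []
--     position = dif.index(max(dif))
--     po.append(data[2*position])
--     po.append(data[2*position+1])
--     return po
-- ===== SOURCE B (Python) =====
-- def diffAndCatching(data):
--     n = len(data)
--     if n < 2:
--         raise ValueError("no pair to catch")
--     best_diff = data[1] - data[0]
--     best_pos = 0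
--     pos = 1
--     for ii in range(3, n, 2):
--         d = data[ii] - data[ii - 1]
--         if d > best_diff:
--             best_diff = d
--             best_pos = pos
--         pos += 1
--     return [data[2 * best_pos], data[2 * best_pos + 1]]
-- ===== Notes on version B (the rewrite author's own statement) =====
-- stated objective: alternative
-- what changed: Single pass tracking the running best difference and its pair position (strict > keeps the first maximum), instead of building the whole diff list and then scanning it twice with max() and .index().
import Mathlib
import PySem

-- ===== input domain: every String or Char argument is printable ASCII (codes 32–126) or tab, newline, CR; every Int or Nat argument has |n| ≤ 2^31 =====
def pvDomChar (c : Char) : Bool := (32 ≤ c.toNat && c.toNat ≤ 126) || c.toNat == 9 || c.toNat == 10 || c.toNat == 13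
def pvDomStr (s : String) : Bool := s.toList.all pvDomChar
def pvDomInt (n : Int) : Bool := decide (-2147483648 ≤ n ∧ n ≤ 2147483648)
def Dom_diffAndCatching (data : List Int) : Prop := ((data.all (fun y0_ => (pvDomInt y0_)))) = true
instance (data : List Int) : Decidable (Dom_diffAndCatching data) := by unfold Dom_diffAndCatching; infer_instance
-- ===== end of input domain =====

-- B replaces A's build-diff-list / max() / .index() triple scan by a single loop
-- tracking the running best difference and its pair position (alternative decomposition).

-- ===== PORT A =====
def diffAndCatching (data : List Int) : List Int :=
  let dif : List Int :=
    (PySem.List.pyRange 1 (data.length : Int) 2).foldl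
      (fun acc ii => acc ++ [PySem.List.pyGetD data ii 0 - PySem.List.pyGetD data (ii - 1) 0]) []
  match PySem.List.max? dif (fun y => y) with
  | none => []    -- max([]) raises ValueError; excluded by Pre_
  | some m =>
    match PySem.List.index? dif m with
    | none => []  -- unreachable: the max is in the list
    | some position =>
      [PySem.List.pyGetD data (2 * (position : Int)) 0,
       PySem.List.pyGetD data (2 * (position : Int) + 1) 0]

-- ===== PORT B =====
def diffAndCatching_alt (data : List Int) : List Int :=
  let n : Int := (data.length : Int)
  if n < 2 then []  -- B raises ValueError here; excluded by Pre_
  else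
    let st : Int × Int × Int :=
      (PySem.List.pyRange 3 n 2).foldl
        (fun (s : Int × Int × Int) ii =>
          let d := PySem.List.pyGetD data ii 0 - PySem.List.pyGetD data (ii - 1) 0
          if d > s.1 then (d, s.2.2, s.2.2 + 1) else (s.1, s.2.1, s.2.2 + 1))
        (PySem.List.pyGetD data 1 0 - PySem.List.pyGetD data 0 0, 0, 1)
    [PySem.List.pyGetD data (2 * st.2.1) 0,
     PySem.List.pyGetD data (2 * st.2.1 + 1) 0]

-- ===== PRECONDITION & SPEC =====
-- Pre_ excludes exactly the inputs with fewer than two elements, where A raises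
-- ValueError (max of the empty diff list); B raises ValueError there too.
def Pre_diffAndCatching (data : List Int) : Prop := 2 ≤ data.length
instance (data : List Int) : Decidable (Pre_diffAndCatching data) := by
  unfold Pre_diffAndCatching; infer_instance
def pvWitness_diffAndCatching : List Int := [4, 9, 2, 3]
def Spec_diffAndCatching (data : List Int) (out : List Int) : Prop := out = diffAndCatching_alt data
instance (data : List Int) (out : List Int) : Decidable (Spec_diffAndCatching data out) := by unfold Spec_diffAndCatching; infer_instance

-- ===== CLAIM (what is proved, stated in full; the proofs are below) =====
def Claim_equal_diffAndCatching : Prop := ∀ (data : List Int), Dom_diffAndCatching data → Pre_diffAndCatching data → Spec_diffAndCatching data (diffAndCatching data)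


-- ===== LEMMAS AND PROOFS =====

-- B's loop body, as a function of the current state and the freshly computed diff.
def pvStep : Int × Int × Int → Int → Int × Int × Int :=
  fun s d => if d > s.1 then (d, s.2.2, s.2.2 + 1) else (s.1, s.2.1, s.2.2 + 1)

theorem foldl_max_mem (l : List Int) (a : Int) :
    l.foldl max a = a ∨ l.foldl max a ∈ l := by
  induction l generalizing a with
  | nil => exact Or.inl rfl
  | cons d t ih =>
    have h1 : List.foldl max a (d :: t) = List.foldl max (max a d) t := rfl
    rcases ih (max a d) with h | h
    · rcases max_choice a d with hm | hm
      · exact Or.inl (by rw [h1, h, hm])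
      · exact Or.inr (by rw [h1, h, hm]; exact List.mem_cons_self)
    · exact Or.inr (by rw [h1]; exact List.mem_cons_of_mem _ h)

theorem index?_exists_of_mem (t : List Int) (m : Int) (hmem : m ∈ t) :
    ∃ k, PySem.List.index? t m = some k := by
  have h0 : PySem.List.index? t m ≠ none := by
    rw [Ne, PySem.List.index?_eq_none_iff]
    exact fun hc => hc hmem
  exact Option.ne_none_iff_exists'.mp h0

-- Characterisation of B's fold: running max, first argmax position, final counter.
theorem argmax_core (l : List Int) (bd bp pos : Int) :
    l.foldl pvStep (bd, bp, pos) =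
      (l.foldl max bd,
       (if l.foldl max bd = bd then bp
        else pos + (((PySem.List.index? l (l.foldl max bd)).getD 0 : Nat) : Int)),
       pos + (l.length : Int)) := by
  induction l generalizing bd bp pos with
  | nil => simp
  | cons d t ih =>
    by_cases hd : bd < d
    · have hstep : pvStep (bd, bp, pos) d = (d, pos, pos + 1) := by
        simp [pvStep, hd]
      have hmbd : max bd d = d := by omega
      rw [List.foldl_cons, List.foldl_cons, hmbd, hstep, ih]
      have hdle : d ≤ t.foldl max d := (PySem.List.le_foldl_max t d).1
      have hne : ¬ t.foldl max d = bd := by omega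
      simp only [Prod.mk.injEq]
      refine ⟨trivial, ?_, ?_⟩
      · by_cases hdm : t.foldl max d = d
        · have hidx : PySem.List.index? (d :: t) (t.foldl max d) = some 0 := by
            rw [hdm]; exact PySem.List.index?_cons_self d t
          rw [if_pos hdm, if_neg hne, hidx]
          simp
        · have hmem : t.foldl max d ∈ t := by
            rcases foldl_max_mem t d with h | h
            · exact absurd h hdm
            · exact h
          obtain ⟨k, hk⟩ := index?_exists_of_mem t (t.foldl max d) hmem
          have hidx : PySem.List.index? (d :: t) (t.foldl max d) = some (k + 1) := by
            rw [PySem.List.index?_cons_of_ne t (fun h => hdm h.symm), hk]; rfl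
          rw [if_neg hdm, if_neg hne, hidx, hk]
          simp only [Option.getD_some]
          push_cast
          ring
      · simp only [List.length_cons]
        push_cast
        ring
    · have hstep : pvStep (bd, bp, pos) d = (bd, bp, pos + 1) := by
        simp only [pvStep, gt_iff_lt, if_neg hd]
      have hmbd : max bd d = bd := by omega
      rw [List.foldl_cons, List.foldl_cons, hmbd, hstep, ih]
      have hble : bd ≤ t.foldl max bd := (PySem.List.le_foldl_max t bd).1
      simp only [Prod.mk.injEq]
      refine ⟨trivial, ?_, ?_⟩
      · by_cases hme : t.foldl max bd = bd
        · rw [if_pos hme, if_pos hme]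
        · have hdm : ¬ t.foldl max bd = d := by omega
          have hmem : t.foldl max bd ∈ t := by
            rcases foldl_max_mem t bd with h | h
            · exact absurd h hme
            · exact h
          obtain ⟨k, hk⟩ := index?_exists_of_mem t (t.foldl max bd) hmem
          have hidx : PySem.List.index? (d :: t) (t.foldl max bd) = some (k + 1) := by
            rw [PySem.List.index?_cons_of_ne t (fun h => hdm h.symm), hk]; rfl
          rw [if_neg hme, if_neg hme, hidx, hk]
          simp only [Option.getD_some]
          push_cast
          ring
      · simp only [List.length_cons]
        push_cast
        ring

-- range(1, n, 2) starts with 1 and then is range(3, n, 2), for n ≥ 2.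
theorem pyRange_two_step (n : Int) (h : 2 ≤ n) :
    PySem.List.pyRange 1 n 2 = 1 :: PySem.List.pyRange 3 n 2 := by
  rw [PySem.List.pyRange_of_pos 1 n (by norm_num),
      PySem.List.pyRange_of_pos 3 n (by norm_num)]
  have h1 : (1 : Int) < n := by omega
  by_cases h3 : 3 < n
  · have hcnt : ((n - 1 + 2 - 1) / 2).toNat = ((n - 3 + 2 - 1) / 2).toNat + 1 := by
      omega
    rw [if_pos h1, if_pos h3, hcnt, List.range_succ_eq_map]
    simp only [List.map_cons, List.map_map, List.cons.injEq]
    refine ⟨by norm_num, ?_⟩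
    apply List.map_congr_left
    intro k _
    simp only [Function.comp_apply]
    push_cast
    ring
  · have hcnt : ((n - 1 + 2 - 1) / 2).toNat = 1 := by omega
    rw [if_pos h1, if_neg h3, hcnt]
    simp [List.range_one]

-- ===== VERDICT (by name: the statement is the Claim_ definition above) =====
theorem diffAndCatching_spec : Claim_equal_diffAndCatching := by
  intro data _ hpre
  unfold Pre_diffAndCatching at hpre
  unfold Spec_diffAndCatching diffAndCatching diffAndCatching_alt
  have hn : (2 : Int) ≤ (data.length : Int) := by exact_mod_cast hpre
  have hnlt : ¬ ((data.length : Int) < 2) := by omega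
  rw [PySem.List.foldl_append_singleton_eq_map
        (fun ii => PySem.List.pyGetD data ii 0 - PySem.List.pyGetD data (ii - 1) 0),
      pyRange_two_step _ hn]
  simp only [List.nil_append, List.map_cons, if_neg hnlt]
  set g : Int → Int := fun ii => PySem.List.pyGetD data ii 0 - PySem.List.pyGetD data (ii - 1) 0
    with hg
  set L : List Int := (PySem.List.pyRange 3 (data.length : Int) 2).map g with hL
  have hhead : PySem.List.pyGetD data 1 0 - PySem.List.pyGetD data 0 0 = g 1 := by
    simp [hg]
  have hhead2 : PySem.List.pyGetD data 1 0 - PySem.List.pyGetD data (1 - 1) 0 = g 1 := rfl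
  have hfold :
      (PySem.List.pyRange 3 (data.length : Int) 2).foldl
        (fun (s : Int × Int × Int) ii =>
          let d := PySem.List.pyGetD data ii 0 - PySem.List.pyGetD data (ii - 1) 0
          if d > s.1 then (d, s.2.2, s.2.2 + 1) else (s.1, s.2.1, s.2.2 + 1))
        (PySem.List.pyGetD data 1 0 - PySem.List.pyGetD data 0 0, 0, 1)
      = L.foldl pvStep (g 1, 0, 1) := by
    rw [hL, List.foldl_map, hhead]
    rfl
  rw [hfold, argmax_core, PySem.List.max?_id_cons]
  by_cases hme : L.foldl max (g 1) = g 1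
  · have hidx : PySem.List.index? (g 1 :: L) (L.foldl max (g 1)) = some 0 := by
      rw [hme]; exact PySem.List.index?_cons_self _ _
    have hidx0 : List.idxOf? (g 1) (g 1 :: L) = some 0 := by
      have h := PySem.List.index?_cons_self (g 1) L
      rwa [PySem.List.index?_eq_idxOf?] at h
    rw [hhead2]
    simp [hme, hidx0]
  · have hmem : L.foldl max (g 1) ∈ L := by
      rcases foldl_max_mem L (g 1) with h | h
      · exact absurd h hme
      · exact h
    obtain ⟨k, hk⟩ := index?_exists_of_mem L (L.foldl max (g 1)) hmem
    have hidx : PySem.List.index? (g 1 :: L) (L.foldl max (g 1)) = some (k + 1) := by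
      rw [PySem.List.index?_cons_of_ne L (fun h => hme h.symm), hk]; rfl
    rw [PySem.List.index?_eq_idxOf?] at hidx hk
    rw [hhead2]
    simp [hme, hidx, hk]
    ring_nf
    exact ⟨trivial, trivial⟩
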